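-- pv_equiv track=rewrite | github.com/joshem163/Label_Encodings | modules_lss.py | exact_k_hop_annuli
-- ===== SOURCE A (Python) =====
-- from collections import deque
--
-- def exact_k_hop_annuli(adj, source: int, max_k: int = 3):
--     """
--     annuli[k] = nodes at exact shortest-path distance k from source
--     """
--     annuli = {k: [] for k in range(max_k + 1)}
--
--     visited = {source}
--     q = deque([(source, 0)])
--
--     while q:
--         node, dist = q.popleft()
--
--         if dist > max_k:
--             continue
--
--         annuli[dist].append(node)
--
--         if dist == max_k:
--             continue
--
--         for nbr in adj[node]:
--             if nbr not in visited:
--                 visited.add(nbr)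
--                 q.append((nbr, dist + 1))
--
--     return annuli
-- ===== SOURCE B (Python) =====
-- def exact_k_hop_annuli(adj, source: int, max_k: int = 3):
--     """
--     annuli[k] = nodes at exact shortest-path distance k from source
--     (level-synchronous BFS: one frontier batch per distance)
--     """
--     annuli = {}
--     visited = {source}
--     frontier = [source]
--     for k in range(max_k + 1):
--         annuli[k] = frontier
--         if k == max_k:
--             break
--         nxt = []
--         for node in frontier:
--             for nbr in adj[node]:
--                 if nbr not in visited:
--                     visited.add(nbr)
--                     nxt.append(nbr)
--         frontier = nxt
--     return annuli
-- ===== Notes on version B (the rewrite author's own statement) =====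
-- stated objective: alternative
-- what changed: Replaces the single (node,dist)-tagged deque loop by a level-synchronous BFS: the whole frontier batch is stored as annuli[k] at once and the next frontier is built by a nested loop over the current one, so no per-node distance tags, no dict pre-initialization and no adj access at the final level.
-- outside the precondition, e.g. on exact_k_hop_annuli({0: [1], 1: [5]}, 0, 2): A returns {0: [0], 1: [1], 2: [5]}, B returns {0: [0], 1: [1], 2: [5]}
import Mathlib
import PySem

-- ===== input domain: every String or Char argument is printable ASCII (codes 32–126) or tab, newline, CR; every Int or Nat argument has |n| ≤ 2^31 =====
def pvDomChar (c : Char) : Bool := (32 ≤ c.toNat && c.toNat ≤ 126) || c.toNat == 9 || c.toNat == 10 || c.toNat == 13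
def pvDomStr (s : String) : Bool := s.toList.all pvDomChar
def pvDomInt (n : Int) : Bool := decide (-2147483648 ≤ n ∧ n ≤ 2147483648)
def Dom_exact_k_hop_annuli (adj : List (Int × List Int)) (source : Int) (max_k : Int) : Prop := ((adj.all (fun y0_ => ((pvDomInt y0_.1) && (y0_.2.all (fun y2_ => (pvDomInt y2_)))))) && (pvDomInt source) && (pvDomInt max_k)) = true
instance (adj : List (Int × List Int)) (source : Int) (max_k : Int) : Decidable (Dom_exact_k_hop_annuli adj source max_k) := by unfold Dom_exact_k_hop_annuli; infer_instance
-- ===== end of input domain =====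

-- B replaces A's (node,dist)-tagged deque BFS by a level-synchronous frontier-batch BFS (alternative decomposition, same cost).


-- ===== PORT A =====
-- A's inner 'for nbr in adj[node]' loop (enqueue unvisited neighbours tagged dist+1).
def pvA_nbrs (nbrs : List Int) (dist : Int) (visited : PySem.Set Int) (q : List (Int × Int)) :
    PySem.Set Int × List (Int × Int) :=
  nbrs.foldl
    (fun st nbr =>
      if PySem.Set.contains st.1 nbr then st
      else (PySem.Set.add st.1 nbr, st.2 ++ [(nbr, dist + 1)]))
    (visited, q)

-- termination-measure helper for pvA_loop: candidates of C not yet visited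
def pvUnvis (C : List Int) (v : PySem.Set Int) : Nat :=
  ((PySem.List.dedup C).filter (fun x => !PySem.Set.contains v x)).length

theorem pvUnvis_add_lt (C : List Int) (v : PySem.Set Int) (nbr : Int)
    (hmem : nbr ∈ C) (hnv : nbr ∉ v) :
    pvUnvis C (PySem.Set.add v nbr) < pvUnvis C v := by
  unfold pvUnvis
  have hadd : PySem.Set.add v nbr = v ++ [nbr] := by
    simp [PySem.Set.add, PySem.Set.contains, hnv]
  have hpred : ∀ x, (!PySem.Set.contains (v ++ [nbr]) x) =
      ((!(x == nbr)) && (!PySem.Set.contains v x)) := by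
    intro x
    by_cases hx : x ∈ v <;> by_cases hxe : x = nbr <;>
      simp [PySem.Set.contains, hx, hxe]
  rw [hadd]
  have hfl : (PySem.List.dedup C).filter (fun x => !PySem.Set.contains (v ++ [nbr]) x)
      = ((PySem.List.dedup C).filter (fun x => !PySem.Set.contains v x)).filter
          (fun x => !(x == nbr)) := by
    rw [List.filter_filter]
    exact List.filter_congr (fun x _ => by rw [hpred x])
  rw [hfl]
  apply List.length_filter_lt_length_iff_exists.2
  refine ⟨nbr, ?_, by simp⟩
  simp [List.mem_filter, hmem, PySem.Set.contains, hnv]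

theorem pvA_nbrs_cons (nbr : Int) (rest : List Int) (dist : Int) (v : PySem.Set Int)
    (q : List (Int × Int)) :
    pvA_nbrs (nbr :: rest) dist v q =
      if nbr ∈ v then pvA_nbrs rest dist v q
      else pvA_nbrs rest dist (PySem.Set.add v nbr) (q ++ [(nbr, dist + 1)]) := by
  by_cases h : nbr ∈ v
  · rw [if_pos h]
    unfold pvA_nbrs
    rw [List.foldl_cons, if_pos (by simpa [PySem.Set.contains] using h)]
  · rw [if_neg h]
    unfold pvA_nbrs
    rw [List.foldl_cons, if_neg (by simpa [PySem.Set.contains] using h)]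

theorem pvA_nbrs_measure (C : List Int) :
    ∀ (nbrs : List Int) (dist : Int) (v : PySem.Set Int) (q : List (Int × Int)),
    (∀ x ∈ nbrs, x ∈ C) →
    (pvA_nbrs nbrs dist v q).2.length + pvUnvis C (pvA_nbrs nbrs dist v q).1
      ≤ q.length + pvUnvis C v := by
  intro nbrs
  induction nbrs with
  | nil => intro dist v q _; simp [pvA_nbrs]
  | cons nbr rest ih =>
    intro dist v q hsub
    rw [pvA_nbrs_cons]
    by_cases h : nbr ∈ v
    · rw [if_pos h]
      exact ih dist v q (fun x hx => hsub x (List.mem_cons_of_mem _ hx))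
    · rw [if_neg h]
      have h1 := ih dist (PySem.Set.add v nbr) (q ++ [(nbr, dist + 1)])
        (fun x hx => hsub x (List.mem_cons_of_mem _ hx))
      have h2 := pvUnvis_add_lt C v nbr (hsub nbr List.mem_cons_self) h
      simp only [List.length_append, List.length_cons, List.length_nil] at h1 ⊢
      omega

-- A's while loop over the deque (well-founded on queue length + unvisited candidates; no fuel).
def pvA_loop (adj : PySem.Dict Int (List Int)) (max_k : Int) :
    List (Int × Int) → PySem.Set Int → PySem.Dict Int (List Int) → PySem.Dict Int (List Int)
  | [], _, annuli => annuli
  | (node, dist) :: rest, visited, annuli =>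
    if max_k < dist then pvA_loop adj max_k rest visited annuli
    else
      -- annuli[dist].append(node); every reached dist is a pre-initialised key, so modify is exact here
      let annuli' := annuli.modify dist [] (fun l => l ++ [node])
      if dist = max_k then pvA_loop adj max_k rest visited annuli'
      else
        match hadj : adj.get? node with
        | none => annuli'      -- Python raises KeyError here; excluded by Pre_
        | some nbrs =>
          let st := pvA_nbrs nbrs dist visited rest
          pvA_loop adj max_k st.2 st.1 annuli'
  termination_by q visited _ => q.length + pvUnvis (adj.items.flatMap (fun p => p.2)) visited
  decreasing_by
    · simp
    · simp
    · have hsub : ∀ x ∈ nbrs, x ∈ adj.items.flatMap (fun p => p.2) := by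
        intro x hx
        exact List.mem_flatMap.2 ⟨(node, nbrs), PySem.Dict.mem_items_of_get?_eq_some adj hadj, hx⟩
      have hm := pvA_nbrs_measure (adj.items.flatMap (fun p => p.2)) nbrs dist visited rest hsub
      simp only [List.length_cons]
      omega

def exact_k_hop_annuli (adj : List (Int × List Int)) (source : Int) (max_k : Int) :
    List (Int × List Int) :=
  let adjD : PySem.Dict Int (List Int) := PySem.Dict.mk adj
  let annuli : PySem.Dict Int (List Int) :=
    (PySem.List.pyRange 0 (max_k + 1) 1).foldl
      (fun d k => d.insert k ([] : List Int)) PySem.Dict.empty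
  let visited : PySem.Set Int := PySem.Set.ofList [source]
  (pvA_loop adjD max_k [(source, 0)] visited annuli).items

-- ===== PORT B =====
-- B's inner 'for nbr in adj[node]' loop (collect unvisited neighbours into nxt).
def pvB_inner (visited : PySem.Set Int) (nxt : List Int) (nbrs : List Int) :
    PySem.Set Int × List Int :=
  nbrs.foldl
    (fun st nbr =>
      if PySem.Set.contains st.1 nbr then st
      else (PySem.Set.add st.1 nbr, st.2 ++ [nbr]))
    (visited, nxt)

-- B's 'for node in frontier' loop building the next frontier.
def pvB_expand (adj : PySem.Dict Int (List Int)) :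
    List Int → PySem.Set Int → List Int → Option (PySem.Set Int × List Int)
  | [], visited, nxt => some (visited, nxt)
  | node :: rest, visited, nxt =>
    match adj.get? node with
    | none => none          -- Python raises KeyError here; excluded by Pre_
    | some nbrs =>
      let st := pvB_inner visited nxt nbrs
      pvB_expand adj rest st.1 st.2

-- B's 'for k in range(max_k + 1)' loop (one frontier batch per level; break at k == max_k).
def pvB_levels (adj : PySem.Dict Int (List Int)) (max_k : Int) :
    List Int → List Int → PySem.Set Int → PySem.Dict Int (List Int) → PySem.Dict Int (List Int)
  | [], _, _, annuli => annuli
  | k :: ks, frontier, visited, annuli =>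
    let annuli' := annuli.insert k frontier
    if k = max_k then annuli'
    else
      match pvB_expand adj frontier visited [] with
      | none => annuli'     -- Python raises KeyError here; excluded by Pre_
      | some st => pvB_levels adj max_k ks st.2 st.1 annuli'

def exact_k_hop_annuli_alt (adj : List (Int × List Int)) (source : Int) (max_k : Int) :
    List (Int × List Int) :=
  let adjD : PySem.Dict Int (List Int) := PySem.Dict.mk adj
  (pvB_levels adjD max_k (PySem.List.pyRange 0 (max_k + 1) 1) [source]
    (PySem.Set.ofList [source]) PySem.Dict.empty).items

-- ===== PRECONDITION & SPEC =====
-- Pre_ excludes the inputs with max_k ≥ 1 whose source is not a key, and those with max_k ≥ 2 whose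
-- adjacency dict is not key-closed, on which A raises KeyError once BFS reaches a missing key; for
-- max_k ≥ 2 it conservatively also excludes some inputs where the missing key is never reached within
-- max_k-1 hops and both A and B return the same value.
def Pre_exact_k_hop_annuli (adj : List (Int × List Int)) (source : Int) (max_k : Int) : Prop :=
  max_k ≤ 0 ∨
    ((PySem.Dict.mk adj).contains source = true ∧
      (max_k ≤ 1 ∨
        (adj.all (fun p => p.2.all (fun m => (PySem.Dict.mk adj).contains m))) = true))
instance (adj : List (Int × List Int)) (source : Int) (max_k : Int) :
    Decidable (Pre_exact_k_hop_annuli adj source max_k) := by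
  unfold Pre_exact_k_hop_annuli; infer_instance

def pvWitness_exact_k_hop_annuli : (List (Int × List Int)) × Int × Int :=
  ([(0, [1, 2]), (1, [0]), (2, [2])], 0, 2)

def Spec_exact_k_hop_annuli (adj : List (Int × List Int)) (source : Int) (max_k : Int) (out : List (Int × List Int)) : Prop := out = exact_k_hop_annuli_alt adj source max_k
instance (adj : List (Int × List Int)) (source : Int) (max_k : Int) (out : List (Int × List Int)) : Decidable (Spec_exact_k_hop_annuli adj source max_k out) := by unfold Spec_exact_k_hop_annuli; infer_instance

-- ===== CLAIM (what is proved, stated in full; the proofs are below) =====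
def Claim_equal_exact_k_hop_annuli : Prop := ∀ (adj : List (Int × List Int)) (source : Int) (max_k : Int), Dom_exact_k_hop_annuli adj source max_k → Pre_exact_k_hop_annuli adj source max_k → Spec_exact_k_hop_annuli adj source max_k (exact_k_hop_annuli adj source max_k)

-- ===== LEMMAS AND PROOFS =====

-- the keys k, k+1, …, k+j handed to B's level loop
def pvLevelKeys (d : Int) (j : Nat) : List Int :=
  (List.range (j + 1)).map (fun i : Nat => d + (i : Int))

-- a graph closed under adjacency: every listed neighbour is itself a key
def pvClosed (adjD : PySem.Dict Int (List Int)) : Prop :=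
  ∀ node nbrs, adjD.get? node = some nbrs → ∀ m ∈ nbrs, (adjD.get? m).isSome = true

theorem pvLevelKeys_succ (d : Int) (j : Nat) :
    pvLevelKeys d (j + 1) = d :: pvLevelKeys (d + 1) j := by
  unfold pvLevelKeys
  rw [List.range_succ_eq_map, List.map_cons, List.map_map]
  congr 1
  · norm_num
  · apply List.map_congr_left
    intro i _
    simp only [Function.comp_apply, Nat.succ_eq_add_one]
    push_cast
    ring

theorem pvLevelKeys_mem_ge (d : Int) (j : Nat) (k : Int) (h : k ∈ pvLevelKeys d j) : d ≤ k := by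
  unfold pvLevelKeys at h
  obtain ⟨i, _, rfl⟩ := List.mem_map.1 h
  omega

theorem pvLevelKeys_nodup (d : Int) (j : Nat) : (pvLevelKeys d j).Nodup := by
  unfold pvLevelKeys
  refine List.Nodup.map ?_ List.nodup_range
  intro a b h
  simpa using h

-- (Dict.mk l).contains / find? on a list whose keys all differ from k
theorem pvDict_contains_false {l : List (Int × List Int)} {k : Int}
    (h : ∀ p ∈ l, p.1 ≠ k) : (PySem.Dict.mk l).contains k = false := by
  rw [PySem.Dict.contains_eq_isSome_get?]
  simp only [PySem.Dict.get?]
  rw [List.find?_eq_none.2 (fun p hp => by simpa using h p hp)]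
  rfl

theorem pvDict_getD_mid (pre tail : List (Int × List Int)) (d : Int) (cur dflt : List Int)
    (hpre : ∀ p ∈ pre, p.1 ≠ d) :
    (PySem.Dict.mk (pre ++ (d, cur) :: tail)).getD d dflt = cur := by
  simp only [PySem.Dict.getD, PySem.Dict.get?]
  rw [List.find?_append, List.find?_eq_none.2 (fun p hp => by simpa using hpre p hp)]
  simp

theorem pvDict_insert_mid (pre tail : List (Int × List Int)) (d : Int) (cur v : List Int)
    (hpre : ∀ p ∈ pre, p.1 ≠ d) (htail : ∀ p ∈ tail, p.1 ≠ d) :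
    (PySem.Dict.mk (pre ++ (d, cur) :: tail)).insert d v
      = PySem.Dict.mk (pre ++ (d, v) :: tail) := by
  have hc : (PySem.Dict.mk (pre ++ (d, cur) :: tail)).contains d = true := by
    rw [PySem.Dict.contains_eq_isSome_get?]
    simp only [PySem.Dict.get?]
    rw [List.find?_append, List.find?_eq_none.2 (fun p hp => by simpa using hpre p hp)]
    simp
  simp only [PySem.Dict.insert, hc, if_true]
  congr 1
  rw [List.map_append, List.map_cons]
  congr 1
  · calc List.map (fun p => if (p.1 == d) = true then (d, v) else p) pre
        = List.map id pre :=
      List.map_congr_left (fun p hp => by simp [hpre p hp])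
      _ = pre := List.map_id _
  congr 1
  · simp
  · calc List.map (fun p => if (p.1 == d) = true then (d, v) else p) tail
        = List.map id tail :=
      List.map_congr_left (fun p hp => by simp [htail p hp])
      _ = tail := List.map_id _

theorem pvDict_modify_mid (pre tail : List (Int × List Int)) (d : Int) (cur : List Int)
    (f : List Int → List Int)
    (hpre : ∀ p ∈ pre, p.1 ≠ d) (htail : ∀ p ∈ tail, p.1 ≠ d) :
    (PySem.Dict.mk (pre ++ (d, cur) :: tail)).modify d [] f
      = PySem.Dict.mk (pre ++ (d, f cur) :: tail) := by
  simp only [PySem.Dict.modify, pvDict_getD_mid pre tail d cur [] hpre]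
  exact pvDict_insert_mid pre tail d cur (f cur) hpre htail

theorem pvB_inner_cons (nbr : Int) (rest : List Int) (v : PySem.Set Int) (nxt : List Int) :
    pvB_inner v nxt (nbr :: rest) =
      if nbr ∈ v then pvB_inner v nxt rest
      else pvB_inner (PySem.Set.add v nbr) (nxt ++ [nbr]) rest := by
  by_cases h : nbr ∈ v
  · rw [if_pos h]
    unfold pvB_inner
    rw [List.foldl_cons, if_pos (by simpa [PySem.Set.contains] using h)]
  · rw [if_neg h]
    unfold pvB_inner
    rw [List.foldl_cons, if_neg (by simpa [PySem.Set.contains] using h)]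

-- the visited-set produced by the neighbour fold does not depend on the accumulator list
theorem pvB_inner_fst (nbrs : List Int) :
    ∀ (v : PySem.Set Int) (n1 n2 : List Int),
    (pvB_inner v n1 nbrs).1 = (pvB_inner v n2 nbrs).1 := by
  induction nbrs with
  | nil => intro v n1 n2; rfl
  | cons nbr rest ih =>
    intro v n1 n2
    rw [pvB_inner_cons, pvB_inner_cons]
    by_cases h : nbr ∈ v
    · rw [if_pos h, if_pos h]; exact ih v n1 n2
    · rw [if_neg h, if_neg h]; exact ih _ (n1 ++ [nbr]) (n2 ++ [nbr])

theorem pvB_inner_snd (nbrs : List Int) :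
    ∀ (v : PySem.Set Int) (nxt : List Int),
    (pvB_inner v nxt nbrs).2 = nxt ++ (pvB_inner v [] nbrs).2 := by
  induction nbrs with
  | nil => intro v nxt; simp [pvB_inner]
  | cons nbr rest ih =>
    intro v nxt
    rw [pvB_inner_cons, pvB_inner_cons]
    by_cases h : nbr ∈ v
    · rw [if_pos h, if_pos h]; exact ih v nxt
    · rw [if_neg h, if_neg h]
      rw [ih _ (nxt ++ [nbr]), ih _ ([] ++ [nbr])]
      simp

-- A's neighbour fold = B's neighbour fold with the new nodes tagged dist+1 and appended to the queue
theorem pvA_nbrs_eq (nbrs : List Int) :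
    ∀ (dist : Int) (v : PySem.Set Int) (q : List (Int × Int)),
    pvA_nbrs nbrs dist v q
      = ((pvB_inner v [] nbrs).1,
         q ++ ((pvB_inner v [] nbrs).2).map (fun n => (n, dist + 1))) := by
  induction nbrs with
  | nil => intro dist v q; simp [pvA_nbrs, pvB_inner]
  | cons nbr rest ih =>
    intro dist v q
    rw [pvA_nbrs_cons, pvB_inner_cons]
    by_cases h : nbr ∈ v
    · rw [if_pos h, if_pos h]; exact ih dist v q
    · rw [if_neg h, if_neg h]
      rw [ih dist _ (q ++ [(nbr, dist + 1)])]
      rw [pvB_inner_fst rest (PySem.Set.add v nbr) ([] ++ [nbr]) [],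
        pvB_inner_snd rest (PySem.Set.add v nbr) ([] ++ [nbr])]
      simp

theorem pvB_inner_mem (nbrs : List Int) :
    ∀ (v : PySem.Set Int) (nxt : List Int) (m : Int),
    m ∈ (pvB_inner v nxt nbrs).2 → m ∈ nxt ∨ m ∈ nbrs := by
  induction nbrs with
  | nil => intro v nxt m h; simp [pvB_inner] at h; exact Or.inl h
  | cons nbr rest ih =>
    intro v nxt m h
    rw [pvB_inner_cons] at h
    by_cases hc : nbr ∈ v
    · rw [if_pos hc] at h
      rcases ih v nxt m h with h1 | h1
      · exact Or.inl h1
      · exact Or.inr (List.mem_cons_of_mem _ h1)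
    · rw [if_neg hc] at h
      rcases ih _ _ m h with h1 | h1
      · rcases List.mem_append.1 h1 with h2 | h2
        · exact Or.inl h2
        · simp at h2; exact Or.inr (by simp [h2])
      · exact Or.inr (List.mem_cons_of_mem _ h1)

theorem pvB_expand_some (adjD : PySem.Dict Int (List Int)) :
    ∀ (front : List Int) (visited : PySem.Set Int) (nxt : List Int),
    (∀ n ∈ front, (adjD.get? n).isSome = true) →
    ∃ st, pvB_expand adjD front visited nxt = some st := by
  intro front
  induction front with
  | nil => intro v nxt _; exact ⟨(v, nxt), rfl⟩
  | cons node rest ih =>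
    intro v nxt hfr
    have hs := hfr node List.mem_cons_self
    obtain ⟨nbrs, hget⟩ := Option.isSome_iff_exists.1 hs
    simp only [pvB_expand, hget]
    exact ih _ _ (fun n hn => hfr n (List.mem_cons_of_mem _ hn))

theorem pvB_expand_mem (adjD : PySem.Dict Int (List Int)) :
    ∀ (front : List Int) (visited : PySem.Set Int) (nxt : List Int) (st : PySem.Set Int × List Int),
    pvB_expand adjD front visited nxt = some st →
    ∀ m ∈ st.2, m ∈ nxt ∨ ∃ node nbrs, adjD.get? node = some nbrs ∧ m ∈ nbrs := by
  intro front
  induction front with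
  | nil =>
    intro v nxt st h m hm
    simp only [pvB_expand] at h
    cases h
    exact Or.inl hm
  | cons node rest ih =>
    intro v nxt st h m hm
    simp only [pvB_expand] at h
    cases hget : adjD.get? node with
    | none => rw [hget] at h; cases h
    | some nbrs =>
      rw [hget] at h
      rcases ih _ _ _ h m hm with h' | h'
      · rcases pvB_inner_mem nbrs v nxt m h' with h'' | h''
        · exact Or.inl h''
        · exact Or.inr ⟨node, nbrs, hget, h''⟩
      · exact Or.inr h'

-- peeling one whole level off A's queue: processing the dist-d prefix leaves the dist-(d+1) batch
theorem pvA_inner_eq (adjD : PySem.Dict Int (List Int)) (max_k d : Int) (hd : d < max_k) :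
    ∀ (front : List Int) (visited : PySem.Set Int) (next cur : List Int)
      (pre tail : List (Int × List Int)) (st : PySem.Set Int × List Int),
    (∀ n ∈ front, (adjD.get? n).isSome = true) →
    (∀ p ∈ pre, p.1 ≠ d) → (∀ p ∈ tail, p.1 ≠ d) →
    pvB_expand adjD front visited next = some st →
    pvA_loop adjD max_k (front.map (fun n => (n, d)) ++ next.map (fun n => (n, d + 1)))
        visited (PySem.Dict.mk (pre ++ (d, cur) :: tail))
      = pvA_loop adjD max_k (st.2.map (fun n => (n, d + 1))) st.1
          (PySem.Dict.mk (pre ++ (d, cur ++ front) :: tail)) := by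
  intro front
  induction front with
  | nil =>
    intro v next cur pre tail st _ _ _ hexp
    simp only [pvB_expand] at hexp
    cases hexp
    simp
  | cons node rest ih =>
    intro v next cur pre tail st hfr hpre htail hexp
    simp only [pvB_expand] at hexp
    cases hget : adjD.get? node with
    | none =>
      exfalso
      have := hfr node List.mem_cons_self
      rw [hget] at this
      simp at this
    | some nbrs =>
      rw [hget] at hexp
      rw [List.map_cons, List.cons_append, pvA_loop]
      have h1 : ¬ max_k < d := by omega
      have h2 : ¬ d = max_k := by omega
      simp only [h1, if_false, h2]
      rw [pvDict_modify_mid pre tail d cur _ hpre htail, hget]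
      simp only []
      rw [pvA_nbrs_eq nbrs d v (rest.map (fun n => (n, d)) ++ next.map (fun n => (n, d + 1)))]
      have hassoc : rest.map (fun n => (n, d)) ++ next.map (fun n => (n, d + 1))
            ++ ((pvB_inner v [] nbrs).2).map (fun n => (n, d + 1))
          = rest.map (fun n => (n, d)) ++ (next ++ (pvB_inner v [] nbrs).2).map (fun n => (n, d + 1)) := by
        simp
      rw [hassoc]
      have hv : (pvB_inner v next nbrs).1 = (pvB_inner v [] nbrs).1 := pvB_inner_fst nbrs v next []
      have hn : (pvB_inner v next nbrs).2 = next ++ (pvB_inner v [] nbrs).2 := pvB_inner_snd nbrs v next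
      rw [← hv, ← hn]
      rw [ih (pvB_inner v next nbrs).1 (pvB_inner v next nbrs).2 (cur ++ [node]) pre tail st
        (fun n hn' => hfr n (List.mem_cons_of_mem _ hn')) hpre htail hexp]
      simp

-- the last level: every queued node lands in annuli[max_k], adj is never consulted
theorem pvA_last_level (adjD : PySem.Dict Int (List Int)) (max_k : Int) :
    ∀ (front : List Int) (visited : PySem.Set Int) (cur : List Int)
      (pre tail : List (Int × List Int)),
    (∀ p ∈ pre, p.1 ≠ max_k) → (∀ p ∈ tail, p.1 ≠ max_k) →
    pvA_loop adjD max_k (front.map (fun n => (n, max_k))) visited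
        (PySem.Dict.mk (pre ++ (max_k, cur) :: tail))
      = PySem.Dict.mk (pre ++ (max_k, cur ++ front) :: tail) := by
  intro front
  induction front with
  | nil => intro v cur pre tail _ _; simp [pvA_loop]
  | cons node rest ih =>
    intro v cur pre tail hpre htail
    rw [List.map_cons, pvA_loop]
    have h1 : ¬ max_k < max_k := lt_irrefl _
    simp only [h1, if_false, if_true]
    rw [pvDict_modify_mid pre tail max_k cur _ hpre htail]
    rw [ih v (cur ++ [node]) pre tail hpre htail]
    simp

-- the level-by-level correspondence between A's tagged queue and B's frontier loop
theorem pvLevel_eq (adjD : PySem.Dict Int (List Int)) (max_k : Int) :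
    ∀ (j : Nat) (d : Int) (frontier : List Int) (visited : PySem.Set Int)
      (pre : List (Int × List Int)),
    d + j = max_k →
    (d + 1 < max_k → pvClosed adjD) →
    (d < max_k → ∀ n ∈ frontier, (adjD.get? n).isSome = true) →
    (∀ p ∈ pre, p.1 < d) →
    pvA_loop adjD max_k (frontier.map (fun n => (n, d))) visited
        (PySem.Dict.mk (pre ++ (pvLevelKeys d j).map (fun k => (k, ([] : List Int)))))
      = pvB_levels adjD max_k (pvLevelKeys d j) frontier visited (PySem.Dict.mk pre) := by
  intro j
  induction j with
  | zero =>
    intro d frontier visited pre hdj _ _ hpre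
    have hd : d = max_k := by push_cast at hdj; omega
    subst hd
    have hkeys : pvLevelKeys d 0 = [d] := by simp [pvLevelKeys]
    rw [hkeys]
    have hpre' : ∀ p ∈ pre, p.1 ≠ d := fun p hp => by have := hpre p hp; omega
    simp only [List.map_cons, List.map_nil]
    rw [show pre ++ [(d, ([] : List Int))] = pre ++ ((d, ([] : List Int)) :: []) from rfl]
    rw [pvA_last_level adjD d frontier visited [] pre [] hpre' (by simp)]
    have hcont : (PySem.Dict.mk pre).contains d = false := pvDict_contains_false hpre'
    simp only [pvB_levels, if_true]
    have hins : (PySem.Dict.mk pre).insert d frontier = PySem.Dict.mk (pre ++ [(d, frontier)]) := by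
      apply PySem.Dict.ext
      rw [PySem.Dict.items_insert_of_not_contains _ _ hcont]
    simp [hins]
  | succ j ih =>
    intro d frontier visited pre hdj hcl hfr hpre
    have hdlt : d < max_k := by push_cast at hdj; omega
    rw [pvLevelKeys_succ]
    have hfr' := hfr hdlt
    obtain ⟨st, hexp⟩ := pvB_expand_some adjD frontier visited [] hfr'
    -- B side
    have hcont : (PySem.Dict.mk pre).contains d = false :=
      pvDict_contains_false (fun p hp => by have := hpre p hp; omega)
    have hins : (PySem.Dict.mk pre).insert d frontier = PySem.Dict.mk (pre ++ [(d, frontier)]) := by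
      apply PySem.Dict.ext
      rw [PySem.Dict.items_insert_of_not_contains _ _ hcont]
    have hne : ¬ d = max_k := by omega
    conv_rhs => rw [pvB_levels]
    simp only [hne, if_false, hins, hexp]
    -- A side
    have htail0 : ∀ p ∈ (pvLevelKeys (d + 1) j).map (fun k => (k, ([] : List Int))), p.1 ≠ d := by
      intro p hp
      obtain ⟨k, hk, rfl⟩ := List.mem_map.1 hp
      have := pvLevelKeys_mem_ge (d + 1) j k hk
      simp; omega
    have hpre' : ∀ p ∈ pre, p.1 ≠ d := fun p hp => by have := hpre p hp; omega
    have hmap : (d :: pvLevelKeys (d + 1) j).map (fun k => (k, ([] : List Int)))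
        = (d, ([] : List Int)) :: (pvLevelKeys (d + 1) j).map (fun k => (k, ([] : List Int))) := by
      simp
    rw [hmap]
    have h0 : frontier.map (fun n => (n, d))
        = frontier.map (fun n => (n, d)) ++ ([] : List Int).map (fun n => (n, d + 1)) := by simp
    rw [h0]
    rw [pvA_inner_eq adjD max_k d hdlt frontier visited [] [] pre _ st hfr' hpre' htail0 hexp]
    simp only [List.nil_append]
    have hsplit : pre ++ (d, frontier) :: (pvLevelKeys (d + 1) j).map (fun k => (k, ([] : List Int)))
        = (pre ++ [(d, frontier)]) ++ (pvLevelKeys (d + 1) j).map (fun k => (k, ([] : List Int))) := by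
      simp
    rw [hsplit]
    apply ih (d + 1) st.2 st.1 (pre ++ [(d, frontier)])
    · push_cast at hdj ⊢; omega
    · intro hlt; exact hcl (by omega)
    · intro hlt m hm
      rcases pvB_expand_mem adjD frontier visited [] st hexp m hm with h | ⟨node, nbrs, hget, hmn⟩
      · simp at h
      · exact hcl (by omega) node nbrs hget m hmn
    · intro p hp
      rcases List.mem_append.1 hp with h | h
      · have := hpre p h; omega
      · simp only [List.mem_singleton] at h
        subst h
        show d < d + 1
        omega

theorem pvRange_neg (m : Int) (h : m + 1 ≤ 0) : PySem.List.pyRange 0 (m + 1) 1 = [] := by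
  simp only [PySem.List.pyRange]
  have h1 : ¬ (0 : Int) < m + 1 := by omega
  simp [h1]

theorem pvRange_levelKeys (m : Int) (h : 0 ≤ m) :
    PySem.List.pyRange 0 (m + 1) 1 = pvLevelKeys 0 m.toNat := by
  have hn : ((m.toNat + 1 : Nat) : Int) = m + 1 := by omega
  rw [← hn, PySem.List.pyRange_zero_natCast]
  unfold pvLevelKeys
  apply List.map_congr_left
  intro i _
  omega

-- ===== VERDICT (by name: the statement is the Claim_ definition above) =====
theorem exact_k_hop_annuli_spec : Claim_equal_exact_k_hop_annuli := by
  unfold Claim_equal_exact_k_hop_annuli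
  intro adj source max_k _ hpre
  unfold Spec_exact_k_hop_annuli exact_k_hop_annuli exact_k_hop_annuli_alt
  simp only []
  by_cases hneg : max_k < 0
  · -- max_k < 0: range empty, A skips its only queue entry, both return the empty dict
    rw [pvRange_neg max_k (by omega)]
    simp only [List.foldl_nil]
    rw [pvA_loop]
    simp only [hneg, if_true]
    rw [pvA_loop, pvB_levels]
  · have h0 : (0 : Int) ≤ max_k := by omega
    have hsrc : (0 : Int) < max_k → (PySem.Dict.mk adj).contains source = true := by
      intro hlt
      rcases hpre with h | h
      · omega
      · exact h.1
    have hclo : (1 : Int) < max_k →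
        (adj.all (fun p => p.2.all (fun m => (PySem.Dict.mk adj).contains m))) = true := by
      intro hlt
      rcases hpre with h | h
      · omega
      · rcases h.2 with h' | h'
        · omega
        · exact h'
    rw [pvRange_levelKeys max_k h0]
    have hinit : (pvLevelKeys 0 max_k.toNat).foldl
        (fun d k => d.insert k ([] : List Int)) PySem.Dict.empty
        = PySem.Dict.mk (([] : List (Int × List Int))
            ++ (pvLevelKeys 0 max_k.toNat).map (fun k => (k, ([] : List Int)))) := by
      apply PySem.Dict.ext
      rw [PySem.Dict.items_foldl_insert_fresh (pvLevelKeys 0 max_k.toNat) (fun k => k)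
        (fun _ => ([] : List Int)) PySem.Dict.empty (fun a _ => PySem.Dict.contains_empty a)
        (by simpa using pvLevelKeys_nodup 0 max_k.toNat)]
      simp [PySem.Dict.empty]
    rw [hinit]
    have hq : [((source : Int), (0 : Int))] = [source].map (fun n => (n, (0 : Int))) := rfl
    rw [hq]
    have hempty : PySem.Dict.empty = PySem.Dict.mk ([] : List (Int × List Int)) := rfl
    rw [hempty]
    congr 1
    apply pvLevel_eq (PySem.Dict.mk adj) max_k max_k.toNat 0 [source] (PySem.Set.ofList [source]) []
    · omega
    · -- closedness under adjacency, from Pre_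
      intro hlt node nbrs hget m hm
      have hall := hclo (by omega)
      rw [List.all_eq_true] at hall
      have hmemadj : (node, nbrs) ∈ adj :=
        PySem.Dict.mem_items_of_get?_eq_some (PySem.Dict.mk adj) hget
      have h2 := hall (node, nbrs) hmemadj
      rw [List.all_eq_true] at h2
      have h3 := h2 m hm
      rw [PySem.Dict.contains_eq_isSome_get?] at h3
      simpa using h3
    · -- the source is a key, from Pre_
      intro hlt n hn
      simp only [List.mem_singleton] at hn
      subst hn
      have h1 := hsrc hlt
      rw [PySem.Dict.contains_eq_isSome_get?] at h1
      exact h1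
    · intro p hp
      simp at hp
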